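-- pv_equiv track=rewrite | github.com/markusrobertjonsson/bulgsol | partition.py | get_first_occurrence_indices
-- ===== SOURCE A (Python) =====
-- def get_first_occurrence_indices(sorted_list):
--     if not sorted_list:
--         return []
--     unique_indices = [0]  # The first element is always a unique occurrence in a sorted list
--     for i in range(1, len(sorted_list)):
--         if sorted_list[i] != sorted_list[i - 1]:
--             unique_indices.append(i)
--     return unique_indices
-- ===== SOURCE B (Python) =====
-- from itertools import groupby
--
-- def get_first_occurrence_indices(sorted_list):
--     result = []
--     offset = 0
--     for _, group in groupby(sorted_list):
--         result.append(offset)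
--         offset += sum(1 for _ in group)
--     return result
-- ===== Notes on version B (the rewrite author's own statement) =====
-- stated objective: idiomatic
-- what changed: Replaces the index-based neighbor-comparison scan with itertools.groupby over runs of equal values, accumulating each run's start offset.
import Mathlib
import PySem

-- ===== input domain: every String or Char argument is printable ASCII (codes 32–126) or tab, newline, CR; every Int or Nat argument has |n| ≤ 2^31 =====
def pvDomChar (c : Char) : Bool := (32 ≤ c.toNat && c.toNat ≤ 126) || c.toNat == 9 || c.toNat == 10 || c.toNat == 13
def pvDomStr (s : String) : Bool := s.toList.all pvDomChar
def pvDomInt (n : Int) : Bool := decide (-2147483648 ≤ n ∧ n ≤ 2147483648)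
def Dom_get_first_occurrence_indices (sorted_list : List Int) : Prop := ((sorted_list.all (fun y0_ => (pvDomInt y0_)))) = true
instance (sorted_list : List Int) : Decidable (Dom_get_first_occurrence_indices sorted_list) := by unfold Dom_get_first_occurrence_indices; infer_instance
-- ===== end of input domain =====

-- B replaces A's index-based neighbor-comparison scan by an itertools.groupby-style
-- walk over runs of equal values, accumulating each run's start offset (idiomatic).

-- ===== PORT A =====
-- literal transliteration: early return on empty, then fold over range(1, len)
-- appending i whenever sorted_list[i] != sorted_list[i-1]
def get_first_occurrence_indices (sorted_list : List Int) : List Int :=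
  if sorted_list = [] then []
  else
    (PySem.List.pyRange 1 (sorted_list.length : Int) 1).foldl
      (fun acc i =>
        if PySem.List.pyGetD sorted_list i 0 ≠ PySem.List.pyGetD sorted_list (i - 1) 0 then
          acc ++ [i]
        else acc)
      [0]

-- ===== PORT B =====
-- groupby-style recursion: each step peels one maximal run of equal values,
-- emits the current offset, and advances the offset by the run's length.
def pvGroupStarts : List Int → Int → List Int
  | [], _ => []
  | x :: rest, off =>
    off :: pvGroupStarts (rest.dropWhile (· == x)) (off + 1 + (rest.takeWhile (· == x)).length)
termination_by l => l.length
decreasing_by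
  simpa using Nat.lt_succ_of_le (List.length_dropWhile_le _ _)

def get_first_occurrence_indices_alt (sorted_list : List Int) : List Int :=
  pvGroupStarts sorted_list 0

-- ===== PRECONDITION & SPEC =====
def Spec_get_first_occurrence_indices (sorted_list : List Int) (out : List Int) : Prop := out = get_first_occurrence_indices_alt sorted_list
instance (sorted_list : List Int) (out : List Int) : Decidable (Spec_get_first_occurrence_indices sorted_list out) := by unfold Spec_get_first_occurrence_indices; infer_instance

-- ===== CLAIM (what is proved, stated in full; the proofs are below) =====
def Claim_equal_get_first_occurrence_indices : Prop := ∀ (sorted_list : List Int), Dom_get_first_occurrence_indices sorted_list → Spec_get_first_occurrence_indices sorted_list (get_first_occurrence_indices sorted_list)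

-- ===== LEMMAS AND PROOFS =====

-- common reference: change-detection scan carrying (previous element, current index)
def pvScanIdx : Int → Int → List Int → List Int
  | _, _, [] => []
  | prev, i, y :: ys => (if y ≠ prev then [i] else []) ++ pvScanIdx y (i + 1) ys

lemma pvScanIdx_run (x : Int) (rest : List Int) :
    ∀ (run : List Int) (i : Int), (∀ y ∈ run, y = x) →
      pvScanIdx x i (run ++ rest) = pvScanIdx x (i + run.length) rest := by
  intro run
  induction run with
  | nil => intro i _; simp
  | cons r rs ih =>
      intro i h
      have hr : r = x := h r (by simp)
      have hrs : ∀ y ∈ rs, y = x := fun y hy => h y (by simp [hy])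
      subst hr
      simp only [List.cons_append, pvScanIdx]
      rw [if_neg (not_not_intro rfl), ih (i + 1) hrs]
      simp only [List.nil_append]
      congr 1
      simp only [List.length_cons]
      push_cast
      ring

lemma pvGroupStarts_eq_scan :
    ∀ (n : Nat) (xs : List Int) (x off : Int), xs.length ≤ n →
      pvGroupStarts (x :: xs) off = off :: pvScanIdx x (off + 1) xs := by
  intro n
  induction n with
  | zero =>
      intro xs x off h
      have : xs = [] := List.length_eq_zero_iff.mp (Nat.le_zero.mp h)
      subst this
      simp [pvGroupStarts, pvScanIdx]
  | succ n ih =>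
      intro xs x off h
      rw [pvGroupStarts]
      congr 1
      have hsplit : xs = xs.takeWhile (· == x) ++ xs.dropWhile (· == x) :=
        (List.takeWhile_append_dropWhile).symm
      have hrun : ∀ y ∈ xs.takeWhile (· == x), y = x := by
        intro y hy
        have := List.mem_takeWhile_imp hy
        simpa using this
      conv_rhs => rw [hsplit]
      rw [pvScanIdx_run x _ _ _ hrun]
      cases hdw : xs.dropWhile (· == x) with
      | nil => simp [pvScanIdx, pvGroupStarts]
      | cons y ys =>
          have hy : ¬ (y == x) = true := by
            have := List.head?_dropWhile_not (· == x) xs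
            rw [hdw] at this
            simpa using this
          have hylen : ys.length ≤ n := by
            have h1 : (xs.dropWhile (· == x)).length ≤ xs.length :=
              List.length_dropWhile_le _ _
            rw [hdw] at h1
            simp at h1
            omega
          rw [ih ys y _ hylen]
          simp only [pvScanIdx]
          rw [if_pos (by simpa using hy)]
          simp only [List.cons_append, List.nil_append]

lemma pvFoldA (l : List Int) :
    ∀ (m k : Nat) (acc : List Int), l.length - (k + 1) ≤ m → k < l.length →
      (PySem.List.pyRange ((k : Int) + 1) (l.length : Int) 1).foldl
        (fun acc i =>
          if PySem.List.pyGetD l i 0 ≠ PySem.List.pyGetD l (i - 1) 0 then acc ++ [i] else acc)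
        acc
      = acc ++ pvScanIdx (l.getD k 0) ((k : Int) + 1) (l.drop (k + 1)) := by
  intro m
  induction m with
  | zero =>
      intro k acc hm hk
      have hlen : l.length ≤ k + 1 := by omega
      have hnil : l.drop (k + 1) = [] := List.drop_eq_nil_of_le hlen
      rw [PySem.List.pyRange_one_eq_nil (by omega), hnil]
      simp [pvScanIdx]
  | succ m ih =>
      intro k acc hm hk
      by_cases hlt : k + 1 < l.length
      · rw [PySem.List.pyRange_one_cons (by omega)]
        simp only [List.foldl_cons]
        have hcast : (k : Int) + 1 + 1 = ((k + 1 : Nat) : Int) + 1 := by push_cast; ring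
        rw [hcast, ih (k + 1) _ (by omega) hlt]
        have hdrop : l.drop (k + 1) = l[k + 1]'hlt :: l.drop (k + 2) := by
          rw [List.drop_eq_getElem_cons hlt]
        rw [hdrop]
        simp only [pvScanIdx]
        have hg1 : PySem.List.pyGetD l ((k : Int) + 1) 0 = l[k + 1]'hlt := by
          rw [show (k : Int) + 1 = ((k + 1 : Nat) : Int) by push_cast; ring,
            PySem.List.pyGetD_natCast]
          simp [List.getD_eq_getElem?_getD, hlt]
        have hg2 : PySem.List.pyGetD l ((k : Int) + 1 - 1) 0 = l.getD k 0 := by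
          rw [show (k : Int) + 1 - 1 = (k : Int) by ring, PySem.List.pyGetD_natCast]
        rw [hg1, hg2]
        have hget : l.getD (k + 1) 0 = l[k + 1]'hlt := by
          simp [List.getD_eq_getElem?_getD, hlt]
        rw [hget]
        by_cases hne : l[k + 1]'hlt ≠ l.getD k 0
        · rw [if_pos hne, if_pos hne]
          simp only [List.append_assoc, List.cons_append, List.nil_append]
          norm_num
        · rw [if_neg hne, if_neg hne]
          simp only [List.nil_append]
          norm_num
      · have hlen : l.length = k + 1 := by omega
        have hnil : l.drop (k + 1) = [] := List.drop_eq_nil_of_le (by omega)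
        rw [PySem.List.pyRange_one_eq_nil (by omega), hnil]
        simp [pvScanIdx]

-- ===== VERDICT (by name: the statement is the Claim_ definition above) =====
theorem get_first_occurrence_indices_spec : Claim_equal_get_first_occurrence_indices := by
  intro l _
  unfold Spec_get_first_occurrence_indices get_first_occurrence_indices get_first_occurrence_indices_alt
  cases l with
  | nil => simp [pvGroupStarts]
  | cons x xs =>
      rw [if_neg (by simp)]
      have hA := pvFoldA (x :: xs) (x :: xs).length 0 [0] (by omega) (by simp)
      simp only [Nat.cast_zero, zero_add] at hA
      rw [show (1 : Int) = (0 : Int) + 1 by ring] at hA ⊢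
      rw [hA]
      have hB := pvGroupStarts_eq_scan xs.length xs x 0 (le_refl _)
      rw [hB]
      simp
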